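-- pv_equiv track=rewrite | github.com/411231185-cmd/Katalog-RSS | PLOSIADKI-RSS/PromPortal/build_promportal_v3.py | make_phrases
-- ===== SOURCE A (Python) =====
-- def make_phrases(name: str, machines: str, sku: str) -> str:
--     p = []
--     if name[:50]: p.append(name[:50])
--     words = name.split()
--     buy = f"купить {' '.join(words[:3])}"[:50]
--     if buy not in p: p.append(buy)
--     for m in (machines.split(", ")[:3] if machines else []):
--         ph = f"запчасти {m}"[:50]
--         if ph not in p: p.append(ph)
--     if sku and len(sku) > 3:
--         ph = f"{sku[:40]} купить"[:50]
--         if ph not in p: p.append(ph)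
--     for g in ["запчасти токарный станок","купить запчасти с доставкой",
--               "комплектующие токарного станка"]:
--         if len(p) < 10 and g not in p: p.append(g)
--     return "\n".join(p[:10])
-- ===== SOURCE B (Python) =====
-- def make_phrases(name: str, machines: str, sku: str) -> str:
--     # Phase 1: one ordered list of all candidate phrases.
--     candidates = []
--     if name[:50]:
--         candidates.append(name[:50])
--     candidates.append(f"купить {' '.join(name.split()[:3])}"[:50])
--     for m in (machines.split(", ")[:3] if machines else []):
--         candidates.append(f"запчасти {m}"[:50])
--     if len(sku) > 3:
--         candidates.append(f"{sku[:40]} купить"[:50])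
--     candidates += ["запчасти токарный станок", "купить запчасти с доставкой",
--                    "комплектующие токарного станка"]
--     # Phase 2: single assembly pass — keep first occurrences, cap at 10.
--     out, seen = [], set()
--     for c in candidates:
--         if len(out) >= 10:
--             break
--         if c not in seen:
--             seen.add(c)
--             out.append(c)
--     return "\n".join(out)
-- ===== Notes on version B (the rewrite author's own statement) =====
-- stated objective: simpler
-- what changed: B splits the work into two phases: it first builds one ordered list of all candidate phrases (no membership checks or caps while generating), then a single assembly pass emits first occurrences using a seen-set with a cap of 10, replacing A's interleaved append-if-not-in-list steps and the per-generic len(p)<10 checks.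
import Mathlib
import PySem

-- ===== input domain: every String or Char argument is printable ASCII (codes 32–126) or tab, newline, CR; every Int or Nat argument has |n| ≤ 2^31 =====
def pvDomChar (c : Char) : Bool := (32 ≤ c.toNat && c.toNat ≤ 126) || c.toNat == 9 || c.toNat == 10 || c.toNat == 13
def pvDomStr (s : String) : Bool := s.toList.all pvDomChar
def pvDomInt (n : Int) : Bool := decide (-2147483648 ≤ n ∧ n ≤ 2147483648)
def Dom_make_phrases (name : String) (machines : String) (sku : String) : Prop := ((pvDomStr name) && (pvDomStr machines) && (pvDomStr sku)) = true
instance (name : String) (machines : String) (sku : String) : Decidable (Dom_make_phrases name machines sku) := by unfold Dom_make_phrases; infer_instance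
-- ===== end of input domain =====

-- B restructures A into two phases: build one ordered candidate list, then a single
-- dedup/cap assembly pass with a seen-set (objective: simpler decomposition, same values).

-- ===== PORT A =====
-- literal transliteration of A: grow p with interleaved conditional appends
def make_phrases (name : String) (machines : String) (sku : String) : String :=
  let p : List (List Char) := []
  let n50 := PySem.List.slice name.toList none (some 50)
  let p := if n50 ≠ [] then p ++ [n50] else p
  let words := PySem.Chars.split₀ name.toList
  let buy := PySem.List.slice ((String.toList "купить ") ++
               PySem.Chars.join (String.toList " ") (PySem.List.slice words none (some 3))) none (some 50)
  let p := if buy ∈ p then p else p ++ [buy]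
  let ms := if machines.toList ≠ [] then
              PySem.List.slice (PySem.Chars.splitOn machines.toList (String.toList ", ")) none (some 3)
            else []
  let p := ms.foldl (fun q m =>
             let ph := PySem.List.slice ((String.toList "запчасти ") ++ m) none (some 50)
             if ph ∈ q then q else q ++ [ph]) p
  let p := if sku.toList ≠ [] ∧ 3 < sku.toList.length then
             let ph := PySem.List.slice (PySem.List.slice sku.toList none (some 40) ++
                         (String.toList " купить")) none (some 50)
             if ph ∈ p then p else p ++ [ph]
           else p
  let p := [String.toList "запчасти токарный станок", String.toList "купить запчасти с доставкой",
            String.toList "комплектующие токарного станка"].foldl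
             (fun q g => if q.length < 10 ∧ g ∉ q then q ++ [g] else q) p
  String.ofList (PySem.Chars.join (String.toList "\n") (PySem.List.slice p none (some 10)))

-- ===== PORT B =====
-- B's assembly pass: emit first occurrences (seen-set), stop when the cap runs out
def pvAssemble : List (List Char) → PySem.Set (List Char) → Nat → List (List Char)
  | [], _, _ => []
  | c :: rest, seen, k =>
    if k = 0 then []
    else if PySem.Set.contains seen c then pvAssemble rest seen k
    else c :: pvAssemble rest (PySem.Set.add seen c) (k - 1)

def make_phrases_alt (name : String) (machines : String) (sku : String) : String :=
  let n50 := PySem.List.slice name.toList none (some 50)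
  let candidates : List (List Char) :=
    (if n50 ≠ [] then [n50] else [])
    ++ [PySem.List.slice ((String.toList "купить ") ++
          PySem.Chars.join (String.toList " ")
            (PySem.List.slice (PySem.Chars.split₀ name.toList) none (some 3))) none (some 50)]
    ++ (if machines.toList ≠ [] then
          PySem.List.slice (PySem.Chars.splitOn machines.toList (String.toList ", ")) none (some 3)
        else []).map
         (fun m => PySem.List.slice ((String.toList "запчасти ") ++ m) none (some 50))
    ++ (if 3 < sku.toList.length then
          [PySem.List.slice (PySem.List.slice sku.toList none (some 40) ++
             (String.toList " купить")) none (some 50)]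
        else [])
    ++ [String.toList "запчасти токарный станок", String.toList "купить запчасти с доставкой",
        String.toList "комплектующие токарного станка"]
  String.ofList (PySem.Chars.join (String.toList "\n") (pvAssemble candidates PySem.Set.empty 10))

-- ===== PRECONDITION & SPEC =====
def Spec_make_phrases (name : String) (machines : String) (sku : String) (out : String) : Prop := out = make_phrases_alt name machines sku
instance (name : String) (machines : String) (sku : String) (out : String) : Decidable (Spec_make_phrases name machines sku out) := by unfold Spec_make_phrases; infer_instance

-- ===== CLAIM (what is proved, stated in full; the proofs are below) =====
def Claim_equal_make_phrases : Prop := ∀ (name : String) (machines : String) (sku : String), Dom_make_phrases name machines sku → Spec_make_phrases name machines sku (make_phrases name machines sku)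

-- ===== LEMMAS AND PROOFS =====

-- A's elementary step: append unless already present
def pvDedup (q : List (List Char)) (c : List Char) : List (List Char) :=
  if c ∈ q then q else q ++ [c]

lemma pvDedup_len (q : List (List Char)) (c : List Char) : (pvDedup q c).length ≤ q.length + 1 := by
  unfold pvDedup; split_ifs <;> simp

lemma pvFoldl_dedup_len (cs : List (List Char)) (q : List (List Char)) :
    (cs.foldl pvDedup q).length ≤ q.length + cs.length := by
  induction cs generalizing q with
  | nil => simp
  | cons c rest ih =>
    simp only [List.foldl_cons, List.length_cons]
    have := ih (pvDedup q c)
    have := pvDedup_len q c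
    omega

-- the capped generic loop of A coincides with pvDedup while there is room
lemma pvCap_eq_dedup (gs : List (List Char)) (q : List (List Char))
    (h : q.length + gs.length ≤ 10) :
    gs.foldl (fun q g => if q.length < 10 ∧ g ∉ q then q ++ [g] else q) q = gs.foldl pvDedup q := by
  induction gs generalizing q with
  | nil => simp
  | cons g rest ih =>
    simp only [List.foldl_cons, List.length_cons] at *
    by_cases hg : g ∈ q
    · rw [if_neg (by simp [hg]), show pvDedup q g = q by simp [pvDedup, hg]]
      exact ih q (by omega)
    · rw [if_pos ⟨by omega, hg⟩, show pvDedup q g = q ++ [g] by simp [pvDedup, hg]]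
      exact ih (q ++ [g]) (by simp; omega)

-- folding pvDedup equals appending B's assembly pass, given the seen-set mirrors q
lemma pvFoldl_dedup_assemble (cs : List (List Char)) (q : List (List Char))
    (seen : PySem.Set (List Char)) (k : Nat)
    (hinv : ∀ c, c ∈ seen ↔ c ∈ q) (hk : cs.length ≤ k) :
    cs.foldl pvDedup q = q ++ pvAssemble cs seen k := by
  induction cs generalizing q seen k with
  | nil => simp [pvAssemble]
  | cons c rest ih =>
    simp only [List.foldl_cons, List.length_cons] at *
    have hk0 : k ≠ 0 := by omega
    by_cases hc : c ∈ q
    · rw [show pvDedup q c = q by simp [pvDedup, hc]]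
      rw [show pvAssemble (c :: rest) seen k = pvAssemble rest seen k by
        simp [pvAssemble, hk0]; exact fun h => absurd ((hinv c).mpr hc) h]
      exact ih q seen k hinv (by omega)
    · rw [show pvDedup q c = q ++ [c] by simp [pvDedup, hc]]
      rw [show pvAssemble (c :: rest) seen k = c :: pvAssemble rest (PySem.Set.add seen c) (k - 1) by
        simp [pvAssemble, hk0]; exact fun h => absurd ((hinv c).mp h) hc]
      rw [ih (q ++ [c]) (PySem.Set.add seen c) (k - 1)
        (fun d => by rw [PySem.Set.mem_add]; simp [hinv d, or_comm]) (by omega)]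
      simp

-- A's whole p-pipeline, abstracted over the phrase values, equals B's assembly pass
lemma pvPipeline (n50 buy skuPh g1 g2 g3 : List Char) (ms : List (List Char))
    (f : List Char → List Char) (hasSku : Prop) [Decidable hasSku] (hm : ms.length ≤ 3) :
    PySem.List.slice
      (([g1, g2, g3]).foldl (fun q g => if q.length < 10 ∧ g ∉ q then q ++ [g] else q)
        (let p0 : List (List Char) := if n50 ≠ [] then [] ++ [n50] else []
         let p1 := if buy ∈ p0 then p0 else p0 ++ [buy]
         let p2 := ms.foldl (fun q m => if f m ∈ q then q else q ++ [f m]) p1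
         if hasSku then (if skuPh ∈ p2 then p2 else p2 ++ [skuPh]) else p2))
      none (some 10)
    = pvAssemble ((if n50 ≠ [] then [n50] else []) ++ [buy] ++ ms.map f
        ++ (if hasSku then [skuPh] else []) ++ [g1, g2, g3]) PySem.Set.empty 10 := by
  have hstep : (fun q m => if f m ∈ q then q else q ++ [f m]) = (fun q m => pvDedup q (f m)) := by
    funext q m; rfl
  have h3 : (let p0 : List (List Char) := if n50 ≠ [] then [] ++ [n50] else []
             let p1 := if buy ∈ p0 then p0 else p0 ++ [buy]
             let p2 := ms.foldl (fun q m => if f m ∈ q then q else q ++ [f m]) p1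
             if hasSku then (if skuPh ∈ p2 then p2 else p2 ++ [skuPh]) else p2)
      = ((if n50 ≠ [] then [n50] else []) ++ [buy] ++ ms.map f
          ++ (if hasSku then [skuPh] else [])).foldl pvDedup [] := by
    simp only [hstep, List.foldl_append, List.foldl_cons, List.foldl_nil, List.foldl_map]
    split_ifs <;> simp_all [pvDedup]
  simp only [h3]
  have h1 : (if n50 ≠ [] then [n50] else ([] : List (List Char))).length ≤ 1 := by
    split_ifs <;> simp
  have h2 : (if hasSku then [skuPh] else ([] : List (List Char))).length ≤ 1 := by
    split_ifs <;> simp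
  have hC : ((if n50 ≠ [] then [n50] else []) ++ [buy] ++ ms.map f
      ++ (if hasSku then [skuPh] else []) ++ [g1, g2, g3]).length ≤ 9 := by
    simp only [List.length_append, List.length_map, List.length_cons, List.length_nil]
    omega
  have hlen : (((if n50 ≠ [] then [n50] else []) ++ [buy] ++ ms.map f
      ++ (if hasSku then [skuPh] else [])).foldl pvDedup []).length ≤ 6 := by
    have := pvFoldl_dedup_len ((if n50 ≠ [] then [n50] else []) ++ [buy] ++ ms.map f
      ++ (if hasSku then [skuPh] else [])) []
    simp only [List.length_append, List.length_map, List.length_cons, List.length_nil] at *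
    omega
  rw [pvCap_eq_dedup _ _ (by simp only [List.length_cons, List.length_nil]; omega)]
  rw [← List.foldl_append]
  have hEq := pvFoldl_dedup_assemble ((if n50 ≠ [] then [n50] else []) ++ [buy] ++ ms.map f
      ++ (if hasSku then [skuPh] else []) ++ [g1, g2, g3]) [] PySem.Set.empty 10
    (by intro c; simp [PySem.Set.empty]) (by omega)
  rw [hEq]
  have hlen2 : (pvAssemble ((if n50 ≠ [] then [n50] else []) ++ [buy] ++ ms.map f
      ++ (if hasSku then [skuPh] else []) ++ [g1, g2, g3]) PySem.Set.empty 10).length ≤ 10 := by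
    have hl := pvFoldl_dedup_len ((if n50 ≠ [] then [n50] else []) ++ [buy] ++ ms.map f
      ++ (if hasSku then [skuPh] else []) ++ [g1, g2, g3]) []
    rw [hEq] at hl
    simp only [List.nil_append, List.length_nil] at hl
    omega
  simp only [List.nil_append]
  rw [show ((10:Int)) = ((10:Nat):Int) by norm_num, PySem.List.slice_to_natCast]
  exact List.take_of_length_le hlen2

-- ===== VERDICT (by name: the statement is the Claim_ definition above) =====
theorem make_phrases_spec : Claim_equal_make_phrases := by
  intro name machines sku _
  unfold Spec_make_phrases make_phrases make_phrases_alt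
  have hiff : (sku.toList ≠ [] ∧ 3 < sku.toList.length) ↔ (3 < sku.toList.length) :=
    ⟨And.right, fun h => ⟨by intro hn; rw [hn] at h; simp at h, h⟩⟩
  simp only [hiff]
  refine congrArg String.ofList (congrArg _ ?_)
  refine pvPipeline _ _ _ _ _ _ _
    (fun m => PySem.List.slice ((String.toList "запчасти ") ++ m) none (some 50)) _ ?_
  split_ifs
  · rw [show ((3:Int)) = ((3:Nat):Int) by norm_num, PySem.List.slice_to_natCast]
    exact List.length_take_le 3 _
  · simp
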